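-- pv_equiv track=rewrite | github.com/sgttomas/chirality-piping | tools/drawing_extract/prepare_pandid_tiles.py | partition_emit_boxes
-- ===== SOURCE A (Python) =====
-- def partition_emit_boxes(body: list[int], cols: int, rows: int) -> list[tuple[int, int, list[int]]]:
--     x0, y0, x1, y1 = body
--     width = x1 - x0
--     height = y1 - y0
--     boxes: list[tuple[int, int, list[int]]] = []
--     for row in range(rows):
--         ey0 = y0 + (height * row) // rows
--         ey1 = y0 + (height * (row + 1)) // rows
--         for col in range(cols):
--             ex0 = x0 + (width * col) // cols
--             ex1 = x0 + (width * (col + 1)) // cols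
--             boxes.append((row + 1, col + 1, [ex0, ey0, ex1, ey1]))
--     return boxes
-- ===== SOURCE B (Python) =====
-- def _edges(start, span, n):
--     # Div-free edge generation: one divmod up front, then Bresenham-style
--     # error accumulation reproduces start + (span*c)//n for c = 0..n.
--     q, rem = divmod(span, n)
--     edges = [start]
--     e = start
--     err = 0
--     for _ in range(n):
--         e += q
--         err += rem
--         if err >= n:
--             err -= n
--             e += 1
--         edges.append(e)
--     return edges
--
--
-- def partition_emit_boxes(body: list[int], cols: int, rows: int) -> list[tuple[int, int, list[int]]]:
--     x0, y0, x1, y1 = body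
--     if cols <= 0 or rows <= 0:
--         return []
--     xs = _edges(x0, x1 - x0, cols)
--     ys = _edges(y0, y1 - y0, rows)
--     return [(ri, ci, [ex0, ey0, ex1, ey1])
--             for ri, (ey0, ey1) in enumerate(zip(ys, ys[1:]), 1)
--             for ci, (ex0, ex1) in enumerate(zip(xs, xs[1:]), 1)]
-- ===== Notes on version B (the rewrite author's own statement) =====
-- stated objective: alternative
-- what changed: B generates each axis's tile edges with a Bresenham-style error accumulator (one divmod per axis, then only additions and carry tests) instead of A's two floor divisions per cell, and emits the tiles by enumerating zip(edges, edges[1:]) adjacent pairs instead of re-deriving each cell's four corners; B also returns [] up front for non-positive grids, which is what A's empty ranges produce.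
import Mathlib
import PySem

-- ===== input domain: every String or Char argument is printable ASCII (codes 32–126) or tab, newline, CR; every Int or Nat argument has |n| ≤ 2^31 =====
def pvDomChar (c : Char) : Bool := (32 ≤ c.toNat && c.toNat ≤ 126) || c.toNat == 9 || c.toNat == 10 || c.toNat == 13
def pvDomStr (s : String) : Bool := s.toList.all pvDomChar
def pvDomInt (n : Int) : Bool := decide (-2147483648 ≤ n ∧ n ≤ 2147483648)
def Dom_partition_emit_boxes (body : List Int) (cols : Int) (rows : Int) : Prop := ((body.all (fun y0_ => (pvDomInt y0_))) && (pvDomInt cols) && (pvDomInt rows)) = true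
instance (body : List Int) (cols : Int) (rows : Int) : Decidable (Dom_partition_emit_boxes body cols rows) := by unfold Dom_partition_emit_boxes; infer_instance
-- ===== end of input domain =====

-- B replaces A's two floor divisions per cell by Bresenham-style error accumulation
-- (one divmod per axis, then additive carries), and emits the tiles by zipping adjacent
-- edge pairs instead of re-indexing (objective: alternative algorithm, same asymptotic cost).

-- ===== PORT A =====
def partition_emit_boxes (body : List Int) (cols : Int) (rows : Int) : List (Int × Int × List Int) :=
  match body with
  | [x0, y0, x1, y1] =>
    let width := x1 - x0
    let height := y1 - y0
    (PySem.List.pyRange 0 rows 1).foldl (fun boxes row =>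
      let ey0 := y0 + PySem.Int.floordiv (height * row) rows
      let ey1 := y0 + PySem.Int.floordiv (height * (row + 1)) rows
      (PySem.List.pyRange 0 cols 1).foldl (fun boxes col =>
        let ex0 := x0 + PySem.Int.floordiv (width * col) cols
        let ex1 := x0 + PySem.Int.floordiv (width * (col + 1)) cols
        boxes ++ [(row + 1, col + 1, [ex0, ey0, ex1, ey1])]) boxes) []
  | _ => []   -- Python raises ValueError on unpack; excluded by Pre_

-- ===== PORT B =====
-- Source B's _edges: one divmod, then a Bresenham error accumulator; loop state (e, err, edges).
def pvEdges (start span n : Int) : List Int :=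
  let q := PySem.Int.floordiv span n
  let rem := PySem.Int.mod span n
  ((PySem.List.pyRange 0 n 1).foldl (fun st _ =>
      let e := st.1 + q
      let err := st.2.1 + rem
      if n ≤ err then (e + 1, err - n, st.2.2 ++ [e + 1])
      else (e, err, st.2.2 ++ [e])) (start, (0 : Int), [start])).2.2

def partition_emit_boxes_alt (body : List Int) (cols : Int) (rows : Int) : List (Int × Int × List Int) :=
  match body with
  | x0 :: rest1 =>
    match rest1 with
    | y0 :: rest2 =>
      match rest2 with
      | x1 :: rest3 =>
        match rest3 with
        | y1 :: rest4 =>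
          match rest4 with
          | [] =>
            if cols ≤ 0 ∨ rows ≤ 0 then []
            else
              let xs := pvEdges x0 (x1 - x0) cols
              let ys := pvEdges y0 (y1 - y0) rows
              (PySem.List.enumerate (ys.zip (PySem.List.slice ys (some 1))) 1).flatMap (fun rp =>
                (PySem.List.enumerate (xs.zip (PySem.List.slice xs (some 1))) 1).map (fun cp =>
                  (rp.1, cp.1, [cp.2.1, rp.2.1, cp.2.2, rp.2.2])))
          | _ :: _ => []   -- Source B raises ValueError on unpack; excluded by Pre_
        | [] => []
      | [] => []
    | [] => []
  | [] => []

-- ===== PRECONDITION & SPEC =====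
-- Pre_: the Python unpacking 'x0, y0, x1, y1 = body' raises ValueError unless body has exactly 4 elements.
def Pre_partition_emit_boxes (body : List Int) (cols : Int) (rows : Int) : Prop := body.length = 4
instance (body : List Int) (cols : Int) (rows : Int) : Decidable (Pre_partition_emit_boxes body cols rows) := by unfold Pre_partition_emit_boxes; infer_instance
def pvWitness_partition_emit_boxes : List Int × Int × Int := ([0, 0, 10, 8], 3, 2)

def Spec_partition_emit_boxes (body : List Int) (cols : Int) (rows : Int) (out : List (Int × Int × List Int)) : Prop := out = partition_emit_boxes_alt body cols rows
instance (body : List Int) (cols : Int) (rows : Int) (out : List (Int × Int × List Int)) : Decidable (Spec_partition_emit_boxes body cols rows out) := by unfold Spec_partition_emit_boxes; infer_instance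

-- ===== CLAIM (what is proved, stated in full; the proofs are below) =====
def Claim_equal_partition_emit_boxes : Prop := ∀ (body : List Int) (cols : Int) (rows : Int), Dom_partition_emit_boxes body cols rows → Pre_partition_emit_boxes body cols rows → Spec_partition_emit_boxes body cols rows (partition_emit_boxes body cols rows)

-- ===== LEMMAS AND PROOFS =====

-- One Bresenham carry step: adding (span // n, span % n) with a carry when the error
-- reaches n advances start + (span*k)//n to start + (span*(k+1))//n.
lemma edge_div_step (span n k : Int) (hn : 0 < n) :
    (PySem.Int.floordiv (span * (k + 1)) n =
      PySem.Int.floordiv (span * k) n + PySem.Int.floordiv span n +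
        (if n ≤ PySem.Int.mod (span * k) n + PySem.Int.mod span n then 1 else 0)) ∧
    (PySem.Int.mod (span * (k + 1)) n =
      PySem.Int.mod (span * k) n + PySem.Int.mod span n -
        (if n ≤ PySem.Int.mod (span * k) n + PySem.Int.mod span n then n else 0)) := by
  simp only [PySem.Int.floordiv_eq_ediv_of_pos hn, PySem.Int.mod_eq_emod_of_pos hn]
  have hne : n ≠ 0 := ne_of_gt hn
  have hr1 : 0 ≤ span * k % n := Int.emod_nonneg _ hne
  have hr2 : 0 ≤ span % n := Int.emod_nonneg _ hne
  have hl1 : span * k % n < n := Int.emod_lt_of_pos _ hn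
  have hl2 : span % n < n := Int.emod_lt_of_pos _ hn
  have h1 : span * (k + 1) = (span * k % n + span % n) + n * (span * k / n + span / n) := by
    linear_combination -Int.mul_ediv_add_emod (span * k) n - Int.mul_ediv_add_emod span n
  constructor
  · rw [h1, Int.add_mul_ediv_left _ _ hne]
    split_ifs with hc
    · have hq : (span * k % n + span % n) / n = 1 := by
        have h2 : span * k % n + span % n = (span * k % n + span % n - n) + n * 1 := by ring
        rw [h2, Int.add_mul_ediv_left _ _ hne,
            Int.ediv_eq_zero_of_lt (by omega) (by omega)]
        omega
      omega
    · have hq : (span * k % n + span % n) / n = 0 :=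
        Int.ediv_eq_zero_of_lt (by omega) (by omega)
      omega
  · rw [h1, Int.add_mul_emod_self_left]
    split_ifs with hc
    · have h2 : span * k % n + span % n = (span * k % n + span % n - n) + n * 1 := by ring
      rw [h2, Int.add_mul_emod_self_left, Int.emod_eq_of_lt (by omega) (by omega)]
      ring
    · rw [Int.emod_eq_of_lt (by omega) (by omega)]
      ring

-- Loop invariant for Source B's _edges: after m iterations the accumulator holds
-- start + (span*m)//n, the error (span*m) % n, and the edge list for c = 0..m.
lemma pvEdges_loop (start span n : Int) (hn : 0 < n) (m : Nat) :
    ((List.range m).map (fun k : Nat => (k : Int))).foldl (fun st (_ : Int) =>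
        let e := st.1 + PySem.Int.floordiv span n
        let err := st.2.1 + PySem.Int.mod span n
        if n ≤ err then (e + 1, err - n, st.2.2 ++ [e + 1])
        else (e, err, st.2.2 ++ [e])) (start, (0 : Int), [start]) =
      (start + PySem.Int.floordiv (span * m) n, PySem.Int.mod (span * m) n,
       (List.range (m + 1)).map (fun c : Nat => start + PySem.Int.floordiv (span * (c : Int)) n)) := by
  induction m with
  | zero =>
    simp [PySem.Int.floordiv_eq_ediv_of_pos hn, PySem.Int.mod_eq_emod_of_pos hn]
  | succ m ih =>
    rw [List.range_succ, List.map_append, List.foldl_append, ih]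
    obtain ⟨hd, hm⟩ := edge_div_step span n (m : Int) hn
    have hc : ((m : Nat) + 1 : Int) = ((m : Int) + 1) := by push_cast; ring
    rw [List.range_succ (n := m + 1), List.map_append]
    simp only [List.foldl_cons, List.foldl_nil, List.map_cons, List.map_nil]
    split_ifs with h
    · refine Prod.ext ?_ (Prod.ext ?_ ?_) <;> simp <;> omega
    · refine Prod.ext ?_ (Prod.ext ?_ ?_) <;> simp <;> omega

-- The edge table Source B builds is exactly the table of floor-division edges.
lemma pvEdges_eq (start span n : Int) (hn : 0 < n) :
    pvEdges start span n =
      (List.range (n.toNat + 1)).map (fun c : Nat => start + PySem.Int.floordiv (span * (c : Int)) n) := by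
  simp only [pvEdges]
  rw [PySem.List.pyRange_zero n, pvEdges_loop start span n hn n.toNat]

-- zip of an edge table with its tail lists the adjacent pairs.
lemma zip_map_range_drop {α : Type} (f : Nat → α) (n : Nat) :
    ((List.range (n + 1)).map f).zip (((List.range (n + 1)).map f).drop 1) =
      (List.range n).map (fun k => (f k, f (k + 1))) := by
  apply List.ext_getElem
  · simp
  · intro i h1 h2
    simp [List.getElem_zip]

-- enumerate over a mapped range is a mapped range of pairs.
lemma enumerate_map_range {α : Type} (g : Nat → α) (n : Nat) (s : Int) :
    PySem.List.enumerate ((List.range n).map g) s =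
      (List.range n).map (fun k : Nat => (s + (k : Int), g k)) := by
  apply List.ext_getElem
  · simp [PySem.List.length_enumerate]
  · intro i h1 h2
    simp [PySem.List.getElem_enumerate]

-- ===== VERDICT (by name: the statement is the Claim_ definition above) =====
theorem partition_emit_boxes_spec : Claim_equal_partition_emit_boxes := by
  intro body cols rows _ hpre
  unfold Pre_partition_emit_boxes at hpre
  unfold Spec_partition_emit_boxes
  rcases body with _ | ⟨a, _ | ⟨b, _ | ⟨c, _ | ⟨d, _ | ⟨e, t⟩⟩⟩⟩⟩ <;> simp_all
  by_cases hr : rows ≤ 0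
  · simp [partition_emit_boxes, partition_emit_boxes_alt,
      PySem.List.pyRange_one_eq_nil hr, hr]
  by_cases hcneg : cols ≤ 0
  · simp [partition_emit_boxes, partition_emit_boxes_alt,
      PySem.List.pyRange_one_eq_nil hcneg, hcneg]
  rw [not_le] at hr hcneg
  simp only [partition_emit_boxes, partition_emit_boxes_alt,
    if_neg (show ¬ (cols ≤ 0 ∨ rows ≤ 0) by omega)]
  -- A's side: nested append-folds become flatMap of maps over the ranges
  simp only [PySem.List.foldl_append_singleton_eq_map, PySem.List.foldl_append_eq_flatMap]
  -- B's side: rewrite the edge tables and the zip/enumerate pipeline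
  rw [pvEdges_eq a (c - a) cols hcneg, pvEdges_eq b (d - b) rows hr,
      PySem.List.slice_from _ (by omega : (0:Int) ≤ 1),
      PySem.List.slice_from _ (by omega : (0:Int) ≤ 1)]
  simp only [Int.toNat_one]
  rw [zip_map_range_drop, zip_map_range_drop, enumerate_map_range, enumerate_map_range]
  rw [List.flatMap_map]
  rw [PySem.List.pyRange_zero rows, PySem.List.pyRange_zero cols, List.flatMap_map]
  rw [List.flatMap_def, List.flatMap_def]
  apply congrArg List.flatten
  apply List.map_congr_left
  intro r _
  rw [List.map_map, List.map_map]
  apply List.map_congr_left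
  intro k _
  simp only [Function.comp]
  push_cast
  refine Prod.ext (by ring) (Prod.ext (by ring) ?_)
  simp
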